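-- pv_equiv track=rewrite | github.com/KBismark/tasks | dsa/max-sum-of-non-adjacent-elements-in-an-array/solution.py | get_interval_max
-- ===== SOURCE A (Python) =====
-- def get_interval_max(interval, total_length, numbers = []):
--     maximum = 0
--     i = 0
--     while (i<interval):
--         accumulator = 0
--         x = i
--         while (x<total_length):
--             accumulator += numbers[x]
--             x+=interval;
--         maximum = accumulator if accumulator > maximum else maximum
--         i+=1
--     return maximum
-- ===== SOURCE B (Python) =====
-- def get_interval_max(interval, total_length, numbers = []):
--     if interval <= 0:
--         return 0
--     accs = [0] * interval
--     for x in range(total_length):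
--         accs[x % interval] += numbers[x]
--     return max(0, max(accs))
-- ===== Notes on version B (the rewrite author's own statement) =====
-- stated objective: alternative
-- what changed: A's nested residue/stride loops (outer over residues, inner striding through the array) are replaced by one flat pass that distributes each element numbers[x] into a per-residue bucket accs[x % interval], followed by max(0, max(accs)).
import Mathlib
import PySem

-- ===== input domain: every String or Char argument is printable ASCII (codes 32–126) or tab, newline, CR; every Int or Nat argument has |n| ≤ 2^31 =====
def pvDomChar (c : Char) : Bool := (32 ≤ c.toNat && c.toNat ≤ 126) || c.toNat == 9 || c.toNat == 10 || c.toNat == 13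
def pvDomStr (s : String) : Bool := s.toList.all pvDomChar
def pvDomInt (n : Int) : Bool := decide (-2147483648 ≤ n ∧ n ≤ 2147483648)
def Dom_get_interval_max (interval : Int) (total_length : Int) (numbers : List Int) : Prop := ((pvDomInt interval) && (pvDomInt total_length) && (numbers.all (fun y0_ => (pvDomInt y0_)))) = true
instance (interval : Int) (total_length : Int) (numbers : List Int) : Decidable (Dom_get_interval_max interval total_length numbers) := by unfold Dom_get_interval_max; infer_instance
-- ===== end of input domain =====

-- B replaces A's nested residue/stride loops with one flat bucket-distributing pass; equal cost, different structure.

-- ===== PORT A =====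
-- inner while loop of A: accumulator over x = i, i+interval, … while x < total_length
-- (the hypothesis argument 0 < interval is for termination only; A's inner loop only runs with i < interval, i ≥ 0)
-- numbers[x] is ported as (pyGet? …).getD 0; Pre_ keeps every access in range.
def pvInnerA (interval total_length : Int) (numbers : List Int) (x acc : Int) (hn : 0 < interval) : Int :=
  if _h : x < total_length then
    pvInnerA interval total_length numbers (x + interval) (acc + (PySem.List.pyGet? numbers x).getD 0) hn
  else acc
termination_by (total_length - x).toNat
decreasing_by omega

-- outer while loop of A over i = 0, 1, … while i < interval, tracking maximum
def pvOuterA (interval total_length : Int) (numbers : List Int) (i maximum : Int) (hi : 0 ≤ i) : Int :=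
  if h : i < interval then
    let accumulator := pvInnerA interval total_length numbers i 0 (by omega)
    pvOuterA interval total_length numbers (i + 1)
      (if accumulator > maximum then accumulator else maximum) (by omega)
  else maximum
termination_by (interval - i).toNat
decreasing_by omega

def get_interval_max (interval : Int) (total_length : Int) (numbers : List Int) : Int :=
  pvOuterA interval total_length numbers 0 0 (by omega)

-- ===== PORT B =====
-- loop body of B: accs[x % interval] += numbers[x]
def pvStep (n : Int) (nums : List Int) (accs : List Int) (x : Int) : List Int :=
  PySem.List.pySetD accs (PySem.Int.mod x n)
    (PySem.List.pyGetD accs (PySem.Int.mod x n) 0 + (PySem.List.pyGet? nums x).getD 0)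

def get_interval_max_alt (interval : Int) (total_length : Int) (numbers : List Int) : Int :=
  if interval ≤ 0 then 0
  else
    let accs0 : List Int := List.replicate interval.toNat 0
    let accs := (PySem.List.pyRange 0 total_length 1).foldl (pvStep interval numbers) accs0
    max 0 ((PySem.List.max? accs (fun y => y)).getD 0)

-- ===== PRECONDITION & SPEC =====
-- Pre_ excludes exactly the inputs where Python A raises IndexError
-- (interval > 0 and total_length > len(numbers): the inner loop reads numbers[x] past the end).
def Pre_get_interval_max (interval : Int) (total_length : Int) (numbers : List Int) : Prop :=
  0 < interval → total_length ≤ (numbers.length : Int)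
instance (interval : Int) (total_length : Int) (numbers : List Int) : Decidable (Pre_get_interval_max interval total_length numbers) := by unfold Pre_get_interval_max; infer_instance
def pvWitness_get_interval_max : Int × Int × List Int := (2, 3, [1, -2, 3])

def Spec_get_interval_max (interval : Int) (total_length : Int) (numbers : List Int) (out : Int) : Prop := out = get_interval_max_alt interval total_length numbers
instance (interval : Int) (total_length : Int) (numbers : List Int) (out : Int) : Decidable (Spec_get_interval_max interval total_length numbers out) := by unfold Spec_get_interval_max; infer_instance

-- ===== CLAIM (what is proved, stated in full; the proofs are below) =====
def Claim_equal_get_interval_max : Prop := ∀ (interval : Int) (total_length : Int) (numbers : List Int), Dom_get_interval_max interval total_length numbers → Pre_get_interval_max interval total_length numbers → Spec_get_interval_max interval total_length numbers (get_interval_max interval total_length numbers)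

-- ===== LEMMAS AND PROOFS =====

-- the sum of numbers[y] over y ∈ [x, T) with y % n = r
def pvG (T : Int) (nums : List Int) (n x r : Int) : Int :=
  (((PySem.List.pyRange x T 1).filter (fun y => y % n == r)).map
    (fun y => (PySem.List.pyGet? nums y).getD 0)).sum

lemma pvG_nil (T : Int) (nums : List Int) (n x r : Int) (h : T ≤ x) :
    pvG T nums n x r = 0 := by
  simp [pvG, PySem.List.pyRange_one_eq_nil h]

lemma pvG_step (T : Int) (nums : List Int) (n x r : Int) (h : x < T) :
    pvG T nums n x r =
      (if x % n = r then (PySem.List.pyGet? nums x).getD 0 else 0) + pvG T nums n (x + 1) r := by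
  unfold pvG
  rw [PySem.List.pyRange_one_cons h, List.filter_cons]
  by_cases hc : x % n = r <;> simp [hc]

lemma pvG_skip (T : Int) (nums : List Int) (n r : Int) :
    ∀ (k : Nat) (x : Int), (∀ z, x ≤ z → z < x + k → z % n ≠ r) →
      pvG T nums n x r = pvG T nums n (x + k) r := by
  intro k
  induction k with
  | zero => intro x _; simp
  | succ k ih =>
    intro x hz
    by_cases h : x < T
    · rw [pvG_step T nums n x r h]
      have hx : x % n ≠ r := hz x le_rfl (by push_cast; omega)
      rw [if_neg hx]
      have := ih (x + 1) (fun z h1 h2 => hz z (by omega) (by push_cast at h2 ⊢; omega))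
      rw [zero_add, this]
      congr 1
      push_cast
      ring
    · rw [pvG_nil T nums n x r (by omega), pvG_nil T nums n _ r (by omega)]

lemma emod_ne_of_between (n x z : Int) (_hn : 0 < n) (h1 : x < z) (h2 : z < x + n) :
    z % n ≠ x % n := by
  intro h
  have hd : (z - x) % n = 0 := by
    rw [Int.sub_emod, h, sub_self, Int.zero_emod]
  have hdvd : n ∣ (z - x) := Int.dvd_of_emod_eq_zero hd
  have := Int.le_of_dvd (by omega) hdvd
  omega

lemma innerA_acc (n T : Int) (nums : List Int) (hn : 0 < n) :
    ∀ (m : Nat) (x acc : Int), (T - x).toNat = m →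
      pvInnerA n T nums x acc hn = acc + pvInnerA n T nums x 0 hn := by
  intro m
  induction m using Nat.strong_induction_on with
  | _ m ih =>
    intro x acc hm
    conv_lhs => rw [pvInnerA]
    conv_rhs => rw [pvInnerA]
    by_cases h : x < T
    · simp only [dif_pos h]
      rw [ih (T - (x + n)).toNat (by omega) (x + n) _ rfl,
          ih (T - (x + n)).toNat (by omega) (x + n)
            (0 + (PySem.List.pyGet? nums x).getD 0) rfl]
      ring
    · simp [dif_neg h]

lemma innerA_eq_G (n T : Int) (nums : List Int) (hn : 0 < n) :
    ∀ (m : Nat) (x : Int), (T - x).toNat = m →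
      pvInnerA n T nums x 0 hn = pvG T nums n x (x % n) := by
  intro m
  induction m using Nat.strong_induction_on with
  | _ m ih =>
    intro x hm
    rw [pvInnerA]
    by_cases h : x < T
    · simp only [dif_pos h]
      rw [innerA_acc n T nums hn (T - (x + n)).toNat (x + n) _ rfl,
          ih (T - (x + n)).toNat (by omega) (x + n) rfl]
      have hmod : (x + n) % n = x % n := by
        simpa using Int.add_mul_emod_self_left x n 1
      rw [hmod]
      -- RHS: peel x, then skip the n-1 non-matching residues
      rw [pvG_step T nums n x _ h, if_pos rfl]
      have hskip : pvG T nums n (x + 1) (x % n) = pvG T nums n (x + 1 + ((n - 1).toNat : Int)) (x % n) := by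
        apply pvG_skip
        intro z h1 h2
        exact emod_ne_of_between n x z hn (by omega) (by omega)
      rw [hskip]
      have : x + 1 + ((n - 1).toNat : Int) = x + n := by omega
      rw [this]
      ring
    · simp only [dif_neg h]
      rw [pvG_nil T nums n x _ (by omega)]

-- ---- B side ----

lemma length_pvStep (n : Int) (nums : List Int) (accs : List Int) (x : Int) :
    (pvStep n nums accs x).length = accs.length := by
  simp [pvStep, PySem.List.length_pySetD]

lemma length_foldl_pvStep (n : Int) (nums : List Int) :
    ∀ (xs : List Int) (accs : List Int),
      (xs.foldl (pvStep n nums) accs).length = accs.length := by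
  intro xs
  induction xs with
  | nil => intro accs; rfl
  | cons x xs ih => intro accs; rw [List.foldl_cons, ih, length_pvStep]

lemma buckets (n : Int) (nums : List Int) (hn : 0 < n) :
    ∀ (xs : List Int) (accs : List Int) (r : Nat),
      accs.length = n.toNat → (∀ x ∈ xs, 0 ≤ x) → r < n.toNat →
      (xs.foldl (pvStep n nums) accs).getD r 0 =
        accs.getD r 0 +
          ((xs.filter (fun y => y % n == (r : Int))).map
            (fun y => (PySem.List.pyGet? nums y).getD 0)).sum := by
  intro xs
  induction xs with
  | nil => intro accs r _ _ _; simp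
  | cons x xs ih =>
    intro accs r hlen hpos hr
    have hx : 0 ≤ x := hpos x (List.mem_cons_self ..)
    have hmod : PySem.Int.mod x n = x % n := PySem.Int.mod_eq_emod_of_pos hn
    have hnn : 0 ≤ x % n := Int.emod_nonneg x (by omega)
    have hlt : x % n < n := Int.emod_lt_of_pos x hn
    have hidx : (x % n).toNat < accs.length := by omega
    set g : Int := (PySem.List.pyGet? nums x).getD 0 with hg
    have hpg : PySem.List.pyGetD accs (x % n) 0 = accs.getD (x % n).toNat 0 := by
      conv_lhs => rw [show x % n = (((x % n).toNat : Nat) : Int) from by omega]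
      rw [PySem.List.pyGetD_natCast]
    have hstep : pvStep n nums accs x =
        accs.set (x % n).toNat (accs.getD (x % n).toNat 0 + g) := by
      unfold pvStep
      rw [hmod, PySem.List.pySetD_of_nonneg _ _ hnn, hpg]
    rw [List.foldl_cons, hstep,
        ih _ r (by rw [List.length_set]; exact hlen) (fun y hy => hpos y (List.mem_cons_of_mem _ hy)) hr]
    rw [List.filter_cons]
    by_cases hc : (x % n) = (r : Int)
    · have hcb : (x % n == (r : Int)) = true := by simp [hc]
      simp only [hcb, if_true, List.map_cons, List.sum_cons]
      have hrn : (x % n).toNat = r := by omega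
      have hset : (accs.set (x % n).toNat (accs.getD (x % n).toNat 0 + g)).getD r 0 =
          accs.getD r 0 + g := by
        rw [← hrn, List.getD_eq_getElem?_getD, List.getElem?_set_self hidx,
            Option.getD_some]
      rw [hset, ← hg]
      ring
    · have hcb : (x % n == (r : Int)) = false := by simp [hc]
      simp only [hcb, Bool.false_eq_true, if_false]
      have hrn : (x % n).toNat ≠ r := by omega
      have hset : (accs.set (x % n).toNat (accs.getD (x % n).toNat 0 + g)).getD r 0 =
          accs.getD r 0 := by
        rw [List.getD_eq_getElem?_getD, List.getElem?_set_ne hrn, ← List.getD_eq_getElem?_getD]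
      rw [hset]

-- running max over a list, as both sides compute it
lemma foldl_max_shift : ∀ (t : List Int) (a b : Int),
    max a (t.foldl max b) = t.foldl max (max a b) := by
  intro t
  induction t with
  | nil => intro a b; rfl
  | cons c t ih =>
    intro a b
    rw [List.foldl_cons, List.foldl_cons, ih, ← max_assoc]

lemma max_max?_eq_foldl (l : List Int) :
    max 0 ((PySem.List.max? l (fun y => y)).getD 0) = l.foldl (fun a b => max a b) 0 := by
  cases l with
  | nil => simp [PySem.List.max?]
  | cons x t =>
    rw [PySem.List.max?_id_cons]
    simp only [Option.getD_some, List.foldl_cons]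
    exact foldl_max_shift t 0 x

lemma outer_eq (n T : Int) (nums : List Int) (hn : 0 < n) :
    ∀ (m : Nat) (i maximum : Int) (hi : 0 ≤ i), (n - i).toNat = m →
      pvOuterA n T nums i maximum hi =
        ((PySem.List.pyRange i n 1).map (fun r => pvInnerA n T nums r 0 hn)).foldl
          (fun a b => max a b) maximum := by
  intro m
  induction m using Nat.strong_induction_on with
  | _ m ih =>
    intro i maximum hi hm
    rw [pvOuterA]
    by_cases h : i < n
    · simp only [dif_pos h]
      rw [PySem.List.pyRange_one_cons h, List.map_cons, List.foldl_cons,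
          ih (n - (i + 1)).toNat (by omega) (i + 1) _ (by omega) rfl]
      congr 1
      have hmax : max maximum (pvInnerA n T nums i 0 hn) =
          if pvInnerA n T nums i 0 (by omega) > maximum then pvInnerA n T nums i 0 (by omega)
          else maximum := by
        rw [max_def]; split_ifs <;> omega
      rw [hmax]
    · simp only [dif_neg h]
      rw [PySem.List.pyRange_one_eq_nil (by omega)]
      rfl

-- the final bucket list equals the list of A's per-residue sums
lemma accs_eq (n T : Int) (nums : List Int) (hn : 0 < n) :
    (PySem.List.pyRange 0 T 1).foldl (pvStep n nums) (List.replicate n.toNat 0) =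
      (List.range n.toNat).map (fun r : Nat => pvInnerA n T nums ((r : Nat) : Int) 0 hn) := by
  apply List.ext_getElem
  · simp [length_foldl_pvStep]
  · intro r h1 h2
    have h1' := h1
    rw [length_foldl_pvStep, List.length_replicate] at h1'
    rw [← List.getD_eq_getElem _ 0 h1, ← List.getD_eq_getElem _ 0 h2]
    rw [buckets n nums hn _ _ r (by simp) (fun x hx => by
          have := (PySem.List.mem_pyRange_one).1 hx; omega) h1']
    have hrep : (List.replicate n.toNat (0 : Int)).getD r 0 = 0 := by
      rw [List.getD_eq_getElem?_getD, List.getElem?_replicate]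
      split <;> rfl
    rw [hrep, zero_add]
    have hmap : ((List.range n.toNat).map (fun r : Nat => pvInnerA n T nums ((r : Nat) : Int) 0 hn)).getD r 0 =
        pvInnerA n T nums (r : Int) 0 hn := by
      rw [List.getD_eq_getElem _ 0 h2, List.getElem_map, List.getElem_range]
    rw [hmap]
    -- A's strided sum from r = bucket r: through pvG
    rw [innerA_eq_G n T nums hn (T - r).toNat (r : Int) rfl]
    have hrmod : (r : Int) % n = (r : Int) := Int.emod_eq_of_lt (by omega) (by omega)
    rw [hrmod]
    have hskip : pvG T nums n 0 (r : Int) = pvG T nums n (0 + (r : Nat)) (r : Int) := by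
      apply pvG_skip
      intro z hz1 hz2
      have hz : z % n = z := Int.emod_eq_of_lt (by omega) (by omega)
      rw [hz]; omega
    rw [zero_add] at hskip
    rw [← hskip]
    -- bucket r = pvG over [0, T): same filter/map/sum
    unfold pvG
    congr 1

-- ===== VERDICT (by name: the statement is the Claim_ definition above) =====
theorem get_interval_max_spec : Claim_equal_get_interval_max := by
  intro interval total_length numbers _ _
  unfold Spec_get_interval_max
  by_cases hn : 0 < interval
  · have hA : get_interval_max interval total_length numbers =
        ((PySem.List.pyRange 0 interval 1).map
          (fun r => pvInnerA interval total_length numbers r 0 hn)).foldl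
            (fun a b => max a b) 0 := by
      unfold get_interval_max
      rw [outer_eq interval total_length numbers hn interval.toNat 0 0 (by omega) (by omega)]
    have hB : get_interval_max_alt interval total_length numbers =
        max 0 ((PySem.List.max?
          ((PySem.List.pyRange 0 total_length 1).foldl (pvStep interval numbers)
            (List.replicate interval.toNat 0)) (fun y => y)).getD 0) := by
      unfold get_interval_max_alt
      rw [if_neg (by omega)]
    rw [hA, hB, accs_eq interval total_length numbers hn, max_max?_eq_foldl]
    congr 1
    rw [PySem.List.pyRange_one, List.map_map]
    simp
  · unfold get_interval_max get_interval_max_alt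
    rw [if_pos (by omega), pvOuterA, dif_neg (by omega)]
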